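-- pv_equiv track=rewrite | github.com/ibenian/algebench | scripts/latex_to_graph.py | _split_on_relation
-- ===== SOURCE A (Python) =====
-- RELATION_MAP: list[tuple[str, dict[str, str]]] = [
--     (r"\Longleftrightarrow", {"op": "iff", "label": "if and only if", "emoji": "⟺"}),
--     (r"\Longrightarrow", {"op": "implies", "label": "implies", "emoji": "⟹"}),
--     (r"\Leftrightarrow", {"op": "iff", "label": "if and only if", "emoji": "⇔"}),
--     (r"\Rightarrow", {"op": "implies", "label": "implies", "emoji": "⇒"}),
--     (r"\implies", {"op": "implies", "label": "implies", "emoji": "⇒"}),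
--     (r"\propto", {"op": "proportional", "label": "proportional to", "emoji": "∝"}),
--     (r"\approx", {"op": "approximately", "label": "approximately equal", "emoji": "≈"}),
--     (r"\iff", {"op": "iff", "label": "if and only if", "emoji": "⇔"}),
--     (r"\to", {"op": "maps_to", "label": "maps to", "emoji": "→"}),
--     (r"\rightarrow", {"op": "maps_to", "label": "maps to", "emoji": "→"}),
-- ]
--
-- def _split_on_relation(latex: str) -> tuple[str, dict[str, str], str] | None:
--     """If *latex* contains a relation operator from RELATION_MAP, return
--     ``(lhs_latex, relation_meta, rhs_latex)``.  Returns ``None`` when no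
--     relation is found."""
--     best: tuple[int, str, dict[str, str]] | None = None
--     for cmd, meta in RELATION_MAP:
--         idx = latex.find(cmd)
--         if idx != -1 and (best is None or idx < best[0]):
--             best = (idx, cmd, meta)
--     if best is not None:
--         idx, cmd, meta = best
--         lhs = latex[:idx].strip()
--         rhs = latex[idx + len(cmd):].strip()
--         if lhs and rhs:
--             return lhs, meta, rhs
--     return None
-- ===== SOURCE B (Python) =====
-- RELATION_MAP: list[tuple[str, dict[str, str]]] = [
--     (r"\Longleftrightarrow", {"op": "iff", "label": "if and only if", "emoji": "⟺"}),
--     (r"\Longrightarrow", {"op": "implies", "label": "implies", "emoji": "⟹"}),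
--     (r"\Leftrightarrow", {"op": "iff", "label": "if and only if", "emoji": "⇔"}),
--     (r"\Rightarrow", {"op": "implies", "label": "implies", "emoji": "⇒"}),
--     (r"\implies", {"op": "implies", "label": "implies", "emoji": "⇒"}),
--     (r"\propto", {"op": "proportional", "label": "proportional to", "emoji": "∝"}),
--     (r"\approx", {"op": "approximately", "label": "approximately equal", "emoji": "≈"}),
--     (r"\iff", {"op": "iff", "label": "if and only if", "emoji": "⇔"}),
--     (r"\to", {"op": "maps_to", "label": "maps to", "emoji": "→"}),
--     (r"\rightarrow", {"op": "maps_to", "label": "maps to", "emoji": "→"}),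
-- ]
--
-- def _split_on_relation(latex: str) -> tuple[str, dict[str, str], str] | None:
--     """Single left-to-right scan: at each position take the first RELATION_MAP
--     command that starts there; the first position with any match wins."""
--     for i in range(len(latex)):
--         for cmd, meta in RELATION_MAP:
--             if latex.startswith(cmd, i):
--                 lhs = latex[:i].strip()
--                 rhs = latex[i + len(cmd):].strip()
--                 if lhs and rhs:
--                     return lhs, meta, rhs
--                 return None
--     return None
-- ===== Notes on version B (the rewrite author's own statement) =====
-- stated objective: alternative
-- what changed: A runs ten independent str.find scans (one per relation command) and keeps the minimum index; B makes a single left-to-right scan of the string, testing all commands at each position and stopping at the first position where any command matches (list order breaks ties), which reproduces A's min-index/first-wins choice.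
import Mathlib
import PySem

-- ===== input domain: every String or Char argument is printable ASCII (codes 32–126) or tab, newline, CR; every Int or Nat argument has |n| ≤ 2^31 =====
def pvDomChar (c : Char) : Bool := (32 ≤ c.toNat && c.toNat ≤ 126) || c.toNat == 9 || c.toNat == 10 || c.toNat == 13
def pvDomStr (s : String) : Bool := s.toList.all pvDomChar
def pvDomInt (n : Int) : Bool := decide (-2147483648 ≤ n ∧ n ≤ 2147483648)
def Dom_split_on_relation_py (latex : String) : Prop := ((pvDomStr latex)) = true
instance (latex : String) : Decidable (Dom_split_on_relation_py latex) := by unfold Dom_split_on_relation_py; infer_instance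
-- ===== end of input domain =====

-- B replaces A's ten independent full `find` scans (one per relation command) by a single
-- left-to-right scan of the string that tests all commands at each position (objective: alternative).

-- Shared module constant: RELATION_MAP (each dict is an association list in insertion order).
def RELATION_MAP : List (String × List (String × String)) :=
  [ ("\\Longleftrightarrow", [("op", "iff"), ("label", "if and only if"), ("emoji", "⟺")]),
    ("\\Longrightarrow", [("op", "implies"), ("label", "implies"), ("emoji", "⟹")]),
    ("\\Leftrightarrow", [("op", "iff"), ("label", "if and only if"), ("emoji", "⇔")]),
    ("\\Rightarrow", [("op", "implies"), ("label", "implies"), ("emoji", "⇒")]),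
    ("\\implies", [("op", "implies"), ("label", "implies"), ("emoji", "⇒")]),
    ("\\propto", [("op", "proportional"), ("label", "proportional to"), ("emoji", "∝")]),
    ("\\approx", [("op", "approximately"), ("label", "approximately equal"), ("emoji", "≈")]),
    ("\\iff", [("op", "iff"), ("label", "if and only if"), ("emoji", "⇔")]),
    ("\\to", [("op", "maps_to"), ("label", "maps to"), ("emoji", "→")]),
    ("\\rightarrow", [("op", "maps_to"), ("label", "maps to"), ("emoji", "→")]) ]

-- ===== PORT A =====
-- A's loop body: idx = latex.find(cmd); if idx != -1 and (best is None or idx < best[0]): best = (idx, cmd, meta).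
-- (PySem.Str.find is Chars.find on .toList — we keep the characters explicit for the fold.)
def bestStep (l : List Char) (best : Option (Int × String × List (String × String)))
    (p : String × List (String × String)) : Option (Int × String × List (String × String)) :=
  let idx := PySem.Chars.find l p.1.toList
  if idx ≠ -1 ∧ (∀ b ∈ best, idx < b.1) then some (idx, p.1, p.2) else best

def split_on_relation_py (latex : String) : Option (String × (List (String × String)) × String) :=
  match RELATION_MAP.foldl (bestStep latex.toList) none with
  | none => none
  | some (idx, cmd, m) =>
    let lhs := PySem.Str.strip (PySem.Str.slice latex none (some idx))
    let rhs := PySem.Str.strip (PySem.Str.slice latex (some (idx + PySem.Str.len cmd)) none)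
    if lhs ≠ "" ∧ rhs ≠ "" then some (lhs, m, rhs) else none

-- ===== PORT B =====
-- B's scan: for i in range(len(latex)): for cmd, meta in RELATION_MAP: if latex.startswith(cmd, i): …
-- (the inner for-loop that returns the first matching entry is List.find?).
def scanRel (cmds : List (String × List (String × String))) :
    List Char → Option (Nat × String × List (String × String))
  | [] => none
  | c :: rest =>
    match cmds.find? (fun p => p.1.toList.isPrefixOf (c :: rest)) with
    | some p => some (0, p.1, p.2)
    | none => (scanRel cmds rest).map (fun r => (r.1 + 1, r.2))

def split_on_relation_py_alt (latex : String) : Option (String × (List (String × String)) × String) :=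
  match scanRel RELATION_MAP latex.toList with
  | none => none
  | some (i, cmd, m) =>
    let lhs := PySem.Str.strip (PySem.Str.slice latex none (some (i : Int)))
    let rhs := PySem.Str.strip (PySem.Str.slice latex (some ((i : Int) + PySem.Str.len cmd)) none)
    if lhs ≠ "" ∧ rhs ≠ "" then some (lhs, m, rhs) else none

-- ===== PRECONDITION & SPEC =====
def Spec_split_on_relation_py (latex : String) (out : Option (String × (List (String × String)) × String)) : Prop := out = split_on_relation_py_alt latex
instance (latex : String) (out : Option (String × (List (String × String)) × String)) : Decidable (Spec_split_on_relation_py latex out) := by unfold Spec_split_on_relation_py; infer_instance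

-- ===== CLAIM (what is proved, stated in full; the proofs are below) =====
def Claim_equal_split_on_relation_py : Prop := ∀ (latex : String), Dom_split_on_relation_py latex → Spec_split_on_relation_py latex (split_on_relation_py latex)

-- ===== LEMMAS AND PROOFS =====

-- Python str.find on the empty haystack with a nonempty needle is -1.
lemma find_nil_of_ne (sub : List Char) (h : sub ≠ []) : PySem.Chars.find [] sub = -1 := by
  rw [PySem.Chars.find_eq_neg_one_iff]
  simp [List.infix_nil, h]

-- Recurrence for Python str.find over a cons cell (nonempty needle).
lemma find_cons (c : Char) (rest sub : List Char) (_hne : sub ≠ []) :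
    PySem.Chars.find (c :: rest) sub =
      if sub <+: (c :: rest) then 0
      else if PySem.Chars.find rest sub = -1 then -1 else PySem.Chars.find rest sub + 1 := by
  split_ifs with hp hr
  · -- prefix at position 0: find = 0
    have h0 : 0 ≤ PySem.Chars.find (c :: rest) sub :=
      (PySem.Chars.find_nonneg_iff _ _).mpr hp.isInfix
    obtain ⟨-, hmin⟩ := PySem.Chars.find_spec h0
    by_contra hne0
    have hpos : 0 < (PySem.Chars.find (c :: rest) sub).toNat := by omega
    exact hmin 0 hpos (by simpa using hp)
  · -- no occurrence in rest and not a prefix: no occurrence at all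
    rw [PySem.Chars.find_eq_neg_one_iff] at hr ⊢
    intro hinf
    have : PySem.Chars.isIn sub (c :: rest) = true := (PySem.Chars.isIn_iff_infix _ _).mpr hinf
    obtain ⟨j, hj⟩ := (PySem.Chars.exists_prefix_drop_iff_isIn sub (c :: rest)).mpr this
    cases j with
    | zero => exact hp (by simpa using hj)
    | succ k =>
      exact hr <| (PySem.Chars.isIn_iff_infix _ _).mp <|
        (PySem.Chars.exists_prefix_drop_iff_isIn sub rest).mp ⟨k, by simpa using hj⟩
  · -- occurrence in rest at k, none at 0: find = k + 1
    have hk0 : 0 ≤ PySem.Chars.find rest sub := by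
      have := PySem.Chars.neg_one_le_find rest sub; omega
    obtain ⟨hkpre, hkmin⟩ := PySem.Chars.find_spec hk0
    have hinf : sub <:+: (c :: rest) :=
      List.infix_cons ((PySem.Chars.find_nonneg_iff _ _).mp hk0)
    have hf0 : 0 ≤ PySem.Chars.find (c :: rest) sub := (PySem.Chars.find_nonneg_iff _ _).mpr hinf
    obtain ⟨hfpre, hfmin⟩ := PySem.Chars.find_spec hf0
    set f := (PySem.Chars.find (c :: rest) sub).toNat with hfdef
    set k := (PySem.Chars.find rest sub).toNat with hkdef
    have hfne0 : f ≠ 0 := by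
      intro h0
      exact hp (by simpa [h0] using hfpre)
    -- prefix of (c::rest).drop (k+1) = rest.drop k, so f ≤ k + 1
    have hle : f ≤ k + 1 := by
      by_contra hlt
      exact hfmin (k + 1) (by omega) (by simpa using hkpre)
    -- f = m+1, prefix of rest.drop m, minimality in rest gives m ≥ k
    have hge : k + 1 ≤ f := by
      obtain ⟨m, hm⟩ : ∃ m, f = m + 1 := ⟨f - 1, by omega⟩
      have hpre' : sub <+: rest.drop m := by
        have := hfpre
        rw [hm] at this
        simpa using this
      have : ¬ m < k := fun hlt => hkmin m hlt hpre'
      omega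
    have : f = k + 1 := by omega
    have h1 : PySem.Chars.find (c :: rest) sub = (f : Int) := (Int.toNat_of_nonneg hf0).symm
    have h2 : PySem.Chars.find rest sub = (k : Int) := (Int.toNat_of_nonneg hk0).symm
    rw [h1, h2, this]
    push_cast
    ring

-- All commands in RELATION_MAP are nonempty strings.
lemma relmap_nonempty : ∀ p ∈ RELATION_MAP, p.1.toList ≠ [] := by decide

-- Once the accumulator holds index 0, the fold never changes it (find values are ≥ -1).
lemma fold_freeze (l : List Char) (cmds : List (String × List (String × String))) (x : String × List (String × String)) :
    cmds.foldl (bestStep l) (some (0, x)) = some (0, x) := by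
  induction cmds with
  | nil => rfl
  | cons q qs ih =>
    have h := PySem.Chars.neg_one_le_find l q.1.toList
    simp only [List.foldl_cons, bestStep]
    rw [if_neg, ih]
    rintro ⟨h1, h2⟩
    have := h2 (0, x) rfl
    simp only at this
    omega

-- A step with find ≠ 0 preserves "accumulator index is positive".
lemma fold_pos (l : List Char) (cmds : List (String × List (String × String)))
    (hne0 : ∀ q ∈ cmds, PySem.Chars.find l q.1.toList ≠ 0) :
    ∀ acc, (∀ b ∈ acc, 0 < b.1) → ∀ b ∈ cmds.foldl (bestStep l) acc, 0 < b.1 := by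
  induction cmds with
  | nil => intro acc hacc; simpa using hacc
  | cons q qs ih =>
    intro acc hacc
    simp only [List.foldl_cons]
    apply ih (fun r hr => hne0 r (List.mem_cons_of_mem _ hr))
    simp only [bestStep]
    split_ifs with hc
    · intro b hb
      simp only [Option.mem_def, Option.some.injEq] at hb
      subst hb
      have h1 := hne0 q (List.mem_cons_self)
      have h2 := PySem.Chars.neg_one_le_find l q.1.toList
      simp only
      omega
    · exact hacc

-- If every command's find on l is -1, the fold keeps its accumulator.
lemma fold_none (l : List Char) (cmds : List (String × List (String × String)))
    (h : ∀ q ∈ cmds, PySem.Chars.find l q.1.toList = -1) :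
    ∀ acc, cmds.foldl (bestStep l) acc = acc := by
  induction cmds with
  | nil => intro acc; rfl
  | cons q qs ih =>
    intro acc
    simp only [List.foldl_cons, bestStep, h q List.mem_cons_self]
    rw [if_neg (by rintro ⟨h1, -⟩; exact h1 rfl)]
    exact ih (fun r hr => h r (List.mem_cons_of_mem _ hr)) acc

-- One step in the shifted world equals the mapped step in the unshifted world.
lemma step_shift (c : Char) (rest : List Char) (q : String × List (String × String))
    (acc : Option (Int × String × List (String × String)))
    (hq : PySem.Chars.find (c :: rest) q.1.toList =
        (if PySem.Chars.find rest q.1.toList = -1 then -1 else PySem.Chars.find rest q.1.toList + 1)) :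
    bestStep (c :: rest) (acc.map (fun r => (r.1 + 1, r.2))) q =
      (bestStep rest acc q).map (fun r => (r.1 + 1, r.2)) := by
  have hge := PySem.Chars.neg_one_le_find rest q.1.toList
  simp only [bestStep, hq]
  by_cases hf : PySem.Chars.find rest q.1.toList = -1
  · simp [hf]
  · simp only [if_neg hf]
    cases acc with
    | none =>
      rw [if_pos ⟨by omega, by rintro b ⟨⟩⟩, if_pos ⟨hf, by rintro b ⟨⟩⟩]
      rfl
    | some r =>
      by_cases hlt : PySem.Chars.find rest q.1.toList < r.1
      · have hL : ∀ b ∈ (some r).map (fun r => (r.1 + 1, r.2)),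
            PySem.Chars.find rest q.1.toList + 1 < b.1 := by
          rintro b hb
          simp only [Option.map_some, Option.mem_def, Option.some.injEq] at hb
          subst hb; simp only; omega
        have hR : ∀ b ∈ some r, PySem.Chars.find rest q.1.toList < b.1 := by
          rintro b hb
          simp only [Option.mem_def, Option.some.injEq] at hb
          subst hb; exact hlt
        rw [if_pos ⟨by omega, hL⟩, if_pos ⟨hf, hR⟩]
        rfl
      · have hL : ¬ (PySem.Chars.find rest q.1.toList + 1 ≠ -1 ∧
            ∀ b ∈ (some r).map (fun r => (r.1 + 1, r.2)), PySem.Chars.find rest q.1.toList + 1 < b.1) := by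
          rintro ⟨-, h2⟩
          have := h2 (r.1 + 1, r.2) (by simp)
          simp only at this
          omega
        have hR : ¬ (PySem.Chars.find rest q.1.toList ≠ -1 ∧
            ∀ b ∈ some r, PySem.Chars.find rest q.1.toList < b.1) := by
          rintro ⟨-, h2⟩
          exact hlt (by simpa using h2 r rfl)
        rw [if_neg hL, if_neg hR]

-- Shifting every find value by one shifts the fold's result by one.
lemma fold_shift (c : Char) (rest : List Char) (cmds : List (String × List (String × String)))
    (h : ∀ q ∈ cmds, PySem.Chars.find (c :: rest) q.1.toList =
        (if PySem.Chars.find rest q.1.toList = -1 then -1 else PySem.Chars.find rest q.1.toList + 1)) :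
    ∀ acc, cmds.foldl (bestStep (c :: rest)) (acc.map (fun r => (r.1 + 1, r.2))) =
      (cmds.foldl (bestStep rest) acc).map (fun r => (r.1 + 1, r.2)) := by
  induction cmds with
  | nil => intro acc; rfl
  | cons q qs ih =>
    intro acc
    simp only [List.foldl_cons]
    rw [step_shift c rest q acc (h q List.mem_cons_self)]
    exact ih (fun r hr => h r (List.mem_cons_of_mem _ hr)) _

-- A's fold over all commands equals B's single scan (index cast to Int).
lemma fold_eq_scan (cmds : List (String × List (String × String)))
    (hne : ∀ p ∈ cmds, p.1.toList ≠ []) :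
    ∀ l : List Char, cmds.foldl (bestStep l) none =
      (scanRel cmds l).map (fun r => ((r.1 : Int), r.2)) := by
  intro l
  induction l with
  | nil =>
    rw [fold_none [] cmds (fun q hq => find_nil_of_ne _ (hne q hq)) none]
    rfl
  | cons c rest ih =>
    cases hfind : cmds.find? (fun p => p.1.toList.isPrefixOf (c :: rest)) with
    | some p =>
      have hp := List.find?_eq_some_iff_append.mp hfind
      obtain ⟨hpp, pre, post, hcmds, hpre⟩ := hp
      have hscan : scanRel cmds (c :: rest) = some (0, p.1, p.2) := by
        simp [scanRel, hfind]
      rw [hscan]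
      have hppre : p.1.toList <+: (c :: rest) := List.isPrefixOf_iff_prefix.mp hpp
      have hfp : PySem.Chars.find (c :: rest) p.1.toList = 0 := by
        rw [find_cons _ _ _ (hne p (hcmds ▸ List.mem_append_right pre (List.mem_cons_self)))]
        simp [hppre]
      rw [hcmds, List.foldl_append, List.foldl_cons]
      have hpos : ∀ b ∈ pre.foldl (bestStep (c :: rest)) none, 0 < b.1 := by
        apply fold_pos
        · intro q hq
          have hq0 := hpre q hq
          simp only [Bool.not_eq_eq_eq_not, Bool.not_true] at hq0
          have hq' : ¬ q.1.toList <+: (c :: rest) := by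
            rw [← List.isPrefixOf_iff_prefix, hq0]
            simp
          rw [find_cons _ _ _ (hne q (hcmds ▸ List.mem_append_left _ hq))]
          simp only [if_neg hq']
          have := PySem.Chars.neg_one_le_find rest q.1.toList
          split_ifs <;> omega
        · simp
      rw [show bestStep (c :: rest) (pre.foldl (bestStep (c :: rest)) none) p = some (0, p.1, p.2) from ?install]
      · exact fold_freeze _ _ _
      case install =>
        simp only [bestStep, hfp]
        rw [if_pos ⟨by decide, fun b hb => hpos b hb⟩]
    | none =>
      have hnp : ∀ q ∈ cmds, ¬ q.1.toList <+: (c :: rest) := by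
        intro q hq
        have := List.find?_eq_none.mp hfind q hq
        simp only [Bool.not_eq_true] at this
        rw [← List.isPrefixOf_iff_prefix, this]
        simp
      have hsh : ∀ q ∈ cmds, PySem.Chars.find (c :: rest) q.1.toList =
          (if PySem.Chars.find rest q.1.toList = -1 then -1 else PySem.Chars.find rest q.1.toList + 1) := by
        intro q hq
        rw [find_cons _ _ _ (hne q hq), if_neg (hnp q hq)]
      have hmain := fold_shift c rest cmds hsh none
      simp only [Option.map_none] at hmain
      rw [hmain, ih]
      simp only [scanRel, hfind, Option.map_map]
      cases scanRel cmds rest with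
      | none => rfl
      | some r =>
        simp only [Option.map_some, Option.some.injEq, Function.comp_apply]
        push_cast
        rfl

-- ===== VERDICT (by name: the statement is the Claim_ definition above) =====
theorem split_on_relation_py_spec : Claim_equal_split_on_relation_py := by
  intro latex _
  unfold Spec_split_on_relation_py split_on_relation_py split_on_relation_py_alt
  rw [fold_eq_scan RELATION_MAP relmap_nonempty latex.toList]
  cases scanRel RELATION_MAP latex.toList with
  | none => rfl
  | some r => rfl
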